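-- pv_equiv track=rewrite | github.com/Aasthaengg/IBMdataset | Python_codes/p03230/s191883888.py | gen_set
-- ===== SOURCE A (Python) =====
-- def gen_set(k):
--     s = [[0] * k for _ in range(k + 1)]
--
--     for i in range(k + 1):
--         if i == 0:
--             s[i][0] = 1
--             for j in range(1, k):
--                 s[i][j] = s[i][j - 1] + j
--         elif 1 <= i < k:
--             s[i][0] = s[0][i]
--             for j in range(1, k):
--                 if j <= i:
--                     # Horizontal
--                     s[i][j] = s[i][j - 1] + 1
--                 else:
--                     # Vertical
--                     s[i][j] = s[i][j - 1] + j
--         else: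
--             # Diagonal
--             s[i][0] = s[0][0]
--             for j in range(1, k):
--                 s[i][j] = s[i][j - 1] + j + 1
--
--     return s
-- ===== SOURCE B (Python) =====
-- def gen_set(k):
--     out = []
--     for i in range(k + 1):
--         if i == 0:
--             out.append([1 + j * (j + 1) // 2 for j in range(k)])
--         elif i < k:
--             t = 1 + i * (i + 1) // 2
--             out.append([t + j if j <= i else 1 + i + j * (j + 1) // 2 for j in range(k)])
--         else:
--             out.append([1 + j + j * (j + 1) // 2 for j in range(k)])
--     return out
-- ===== Notes on version B (the rewrite author's own statement) =====
-- stated objective: simpler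
-- what changed: B fills every cell from a closed-form triangular-number formula of (i, j) instead of A's left-to-right running sums over previously computed cells.
-- outside the precondition, e.g. on gen_set(0): A raises IndexError, B returns [[]]
-- crash fix: On k = 0 A raises IndexError (it writes index 0 of an empty row); B returns [[]], one empty row. — e.g. on gen_set(0): A raises IndexError, B returns [[]]
import Mathlib
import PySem

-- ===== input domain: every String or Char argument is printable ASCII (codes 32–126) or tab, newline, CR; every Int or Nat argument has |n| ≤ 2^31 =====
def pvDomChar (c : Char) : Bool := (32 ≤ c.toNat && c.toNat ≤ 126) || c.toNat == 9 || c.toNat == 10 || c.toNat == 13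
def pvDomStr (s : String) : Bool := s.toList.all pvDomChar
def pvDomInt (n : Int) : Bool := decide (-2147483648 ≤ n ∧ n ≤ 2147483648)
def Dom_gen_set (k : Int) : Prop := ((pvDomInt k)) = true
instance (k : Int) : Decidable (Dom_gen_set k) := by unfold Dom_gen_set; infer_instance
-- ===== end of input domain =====

-- B replaces A's running-sum accumulation with a closed-form per-cell formula (objective: simpler).

-- ===== PORT A =====
-- s[i][j] = v  (i, j nonnegative in-range indices under Pre_)
def pvSet2 (s : List (List Int)) (i j : Nat) (v : Int) : List (List Int) :=
  s.set i ((s.getD i []).set j v)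
-- s[i][j]
def pvGet2 (s : List (List Int)) (i j : Nat) : Int :=
  (s.getD i []).getD j 0

def gen_set (k : Int) : List (List Int) :=
  let s0 : List (List Int) := (PySem.List.pyRange 0 (k+1) 1).map (fun _ => List.replicate k.toNat 0)
  (PySem.List.pyRange 0 (k+1) 1).foldl (fun s i =>
    if i = 0 then
      let s1 := pvSet2 s i.toNat 0 1
      (PySem.List.pyRange 1 k 1).foldl (fun s j =>
        pvSet2 s i.toNat j.toNat (pvGet2 s i.toNat (j-1).toNat + j)) s1
    else if 1 ≤ i ∧ i < k then
      let s1 := pvSet2 s i.toNat 0 (pvGet2 s 0 i.toNat)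
      (PySem.List.pyRange 1 k 1).foldl (fun s j =>
        if j ≤ i then
          pvSet2 s i.toNat j.toNat (pvGet2 s i.toNat (j-1).toNat + 1)
        else
          pvSet2 s i.toNat j.toNat (pvGet2 s i.toNat (j-1).toNat + j)) s1
    else
      let s1 := pvSet2 s i.toNat 0 (pvGet2 s 0 0)
      (PySem.List.pyRange 1 k 1).foldl (fun s j =>
        pvSet2 s i.toNat j.toNat (pvGet2 s i.toNat (j-1).toNat + j + 1)) s1
  ) s0

-- ===== PORT B =====
def gen_set_alt (k : Int) : List (List Int) :=
  (PySem.List.pyRange 0 (k+1) 1).foldl (fun out i =>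
    if i = 0 then
      out ++ [(PySem.List.pyRange 0 k 1).map (fun j => 1 + PySem.Int.floordiv (j * (j + 1)) 2)]
    else if i < k then
      let t := 1 + PySem.Int.floordiv (i * (i + 1)) 2
      out ++ [(PySem.List.pyRange 0 k 1).map (fun j =>
        if j ≤ i then t + j else 1 + i + PySem.Int.floordiv (j * (j + 1)) 2)]
    else
      out ++ [(PySem.List.pyRange 0 k 1).map (fun j => 1 + j + PySem.Int.floordiv (j * (j + 1)) 2)]) []

-- ===== PRECONDITION & SPEC =====
-- Pre_ excludes only k = 0, where A raises IndexError (it writes to index 0 of an empty row).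
def Pre_gen_set (k : Int) : Prop := k ≠ 0
instance (k : Int) : Decidable (Pre_gen_set k) := by unfold Pre_gen_set; infer_instance
def pvWitness_gen_set : Int := (3)

-- On k = 0 A raises IndexError; B returns [[]] (one empty row), the natural value of the comprehension.
def Raises_gen_set (k : Int) : Prop := k = 0
instance (k : Int) : Decidable (Raises_gen_set k) := by unfold Raises_gen_set; infer_instance
def pvRaiseWitness_gen_set : Int := (0)
def pvRaiseWitnessOut_gen_set : List (List Int) := [[]]

def Spec_gen_set (k : Int) (out : List (List Int)) : Prop := out = gen_set_alt k
instance (k : Int) (out : List (List Int)) : Decidable (Spec_gen_set k out) := by unfold Spec_gen_set; infer_instance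

-- ===== CLAIM (what is proved, stated in full; the proofs are below) =====
def Claim_equal_gen_set : Prop := ∀ (k : Int), Dom_gen_set k → Pre_gen_set k → Spec_gen_set k (gen_set k)
def Claim_raises_gen_set : Prop := (∀ (k : Int), Dom_gen_set k → Raises_gen_set k → ¬ Pre_gen_set k) ∧ (Dom_gen_set (pvRaiseWitness_gen_set) ∧ Raises_gen_set (pvRaiseWitness_gen_set) ∧ gen_set_alt (pvRaiseWitness_gen_set) = pvRaiseWitnessOut_gen_set)

-- ===== LEMMAS AND PROOFS =====

-- the closed-form cell value (B computes it branch-by-branch; the proofs name it)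
def pvCell (k i j : Int) : Int :=
  if i = 0 then 1 + PySem.Int.floordiv (j * (j + 1)) 2
  else if i < k then
    (if j ≤ i then 1 + PySem.Int.floordiv (i * (i + 1)) 2 + j
     else 1 + i + PySem.Int.floordiv (j * (j + 1)) 2)
  else 1 + j + PySem.Int.floordiv (j * (j + 1)) 2

-- the triangular-number step behind every running sum in A
theorem pvQstep (j : Int) :
    PySem.Int.floordiv (j*(j+1)) 2 = PySem.Int.floordiv ((j-1)*j) 2 + j := by
  rw [show j*(j+1) = (j-1)*j + j*2 by ring]
  rw [PySem.Int.floordiv_eq_ediv_of_pos (by omega), PySem.Int.floordiv_eq_ediv_of_pos (by omega)]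
  exact Int.add_mul_ediv_right _ _ (by omega)

-- the three closed forms of pvCell, one per branch
theorem pvCell_zero (k j : Int) : pvCell k 0 j = 1 + PySem.Int.floordiv (j*(j+1)) 2 := by
  simp [pvCell]
theorem pvCell_mid (k i j : Int) (h0 : i ≠ 0) (hk : i < k) :
    pvCell k i j = if j ≤ i then 1 + PySem.Int.floordiv (i*(i+1)) 2 + j
      else 1 + i + PySem.Int.floordiv (j*(j+1)) 2 := by
  simp [pvCell, h0, hk]
theorem pvCell_last (k i j : Int) (h0 : i ≠ 0) (hk : ¬ i < k) :
    pvCell k i j = 1 + j + PySem.Int.floordiv (j*(j+1)) 2 := by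
  simp [pvCell, h0, hk]

-- a fold of writes/reads confined to row i is a fold on that row
theorem pvFoldlRow (l : List Int) (s : List (List Int)) (i : Nat) (hi : i < s.length)
    (g : Int → List Int → List Int) :
    l.foldl (fun s j => s.set i (g j (s.getD i []))) s
      = s.set i (l.foldl (fun r j => g j r) (s.getD i [])) := by
  induction l generalizing s with
  | nil =>
    simp only [List.foldl_nil]
    rw [List.getD_eq_getElem _ _ hi]
    exact (List.set_getElem_self hi).symm
  | cons a t ih =>
    simp only [List.foldl_cons]
    rw [List.getD_eq_getElem _ _ hi]
    rw [ih (s.set i (g a s[i])) (by simpa using hi)]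
    have hx : (s.set i (g a s[i])).getD i [] = g a s[i] := by
      rw [List.getD_eq_getElem _ _ (by simpa using hi)]
      exact List.getElem_set_self (by simpa using hi)
    rw [hx, List.set_set]

-- filling one row by the running recurrence r[j] = r[j-1] + d j yields the closed form f
theorem pvRowFill (n : Nat) (f : Nat → Int) (d : Int → Int)
    (hrec : ∀ j : Nat, 1 ≤ j → j < n → f j = f (j-1) + d (j : Int)) :
    ∀ m : Nat, 1 ≤ m → m ≤ n →
    (PySem.List.pyRange 1 (m : Int) 1).foldl
        (fun r j => r.set j.toNat (r.getD (j-1 : Int).toNat 0 + d j))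
        ((List.replicate n (0:Int)).set 0 (f 0))
      = (List.range n).map (fun t => if t < m then f t else (0:Int)) := by
  intro m
  induction m with
  | zero => omega
  | succ m ih =>
    intro _ hmn
    by_cases hm1 : m = 0
    · subst hm1
      have he : PySem.List.pyRange 1 ((0+1:Nat):Int) 1 = [] := by
        rw [PySem.List.pyRange_one]; norm_num
      rw [he, List.foldl_nil]
      apply List.ext_getElem (by simp)
      intro t ht1 ht2
      simp only [List.getElem_set, List.getElem_replicate, List.getElem_map, List.getElem_range]
      simp only [List.length_set, List.length_replicate] at ht1
      split_ifs with h1 h2 h2 <;> simp_all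
    · have hm : 1 ≤ m := by omega
      rw [show ((m+1 : Nat) : Int) = (m : Int) + 1 by omega,
          PySem.List.pyRange_one_succ_right (by exact_mod_cast hm), List.foldl_append,
          ih hm (by omega), List.foldl_cons, List.foldl_nil]
      have hlen : ((List.range n).map (fun t => if t < m then f t else (0:Int))).length = n := by simp
      have hmn' : m < n := by omega
      have hget : ((List.range n).map (fun t => if t < m then f t else (0:Int))).getD ((m:Int)-1).toNat 0 = f (m-1) := by
        rw [List.getD_eq_getElem _ _ (by simp; omega)]
        simp only [List.getElem_map, List.getElem_range]
        rw [if_pos (by omega)]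
        congr 1
        omega
      rw [hget]
      apply List.ext_getElem (by simp)
      intro t ht1 ht2
      simp only [List.getElem_set, List.getElem_map, List.getElem_range]
      have hmt : ((m:Int)).toNat = m := by omega
      rw [hmt]
      rcases lt_trichotomy t m with h | h | h
      · rw [if_neg (by omega), if_pos h, if_pos (by omega)]
      · subst h
        rw [if_pos rfl, if_pos (by omega)]
        rw [hrec t hm hmn']
      · rw [if_neg (by omega), if_neg (by omega), if_neg (by omega)]

-- the matrix after the first m outer iterations: rows below m are final, the rest still zero
def pvS (n m : Nat) : List (List Int) :=
  (List.range (n+1)).map (fun i =>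
    if i < m then (List.range n).map (fun (t:Nat) => pvCell (n:Int) (i:Int) (t:Int)) else List.replicate n (0:Int))

-- one cell of the already-final row 0
theorem pvGet2_pvS_zero (n m t : Nat) (hm : 1 ≤ m) (ht : t < n) :
    pvGet2 (pvS n m) 0 t = pvCell (n:Int) 0 (t:Int) := by
  have h0 : (pvS n m).getD 0 [] = (List.range n).map (fun (t:Nat) => pvCell (n:Int) 0 (t:Int)) := by
    rw [List.getD_eq_getElem _ _ (by simp [pvS])]
    simp only [pvS, List.getElem_map, List.getElem_range, Nat.cast_zero]
    rw [if_pos (by omega)]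
  unfold pvGet2
  rw [h0, List.getD_eq_getElem _ _ (by simpa using ht)]
  simp only [List.getElem_map, List.getElem_range]

-- one outer iteration: filling row m of the partial matrix by the running recurrence
theorem pvStepRow (n m : Nat) (hn : 1 ≤ n) (hm : m ≤ n) (f : Nat → Int) (d : Int → Int) (v0 : Int)
    (hv0 : v0 = f 0)
    (hrec : ∀ j : Nat, 1 ≤ j → j < n → f j = f (j-1) + d (j : Int))
    (hrow : ∀ t : Nat, f t = pvCell (n:Int) (m:Int) (t:Int)) :
    (PySem.List.pyRange 1 (n:Int) 1).foldl
      (fun s j => pvSet2 s m j.toNat (pvGet2 s m (j-1).toNat + d j))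
      (pvSet2 (pvS n m) m 0 v0)
    = pvS n (m+1) := by
  have hlen : (pvS n m).length = n + 1 := by simp [pvS]
  have hmlt : m < (pvS n m).length := by omega
  have hgm : (pvS n m).getD m [] = List.replicate n (0:Int) := by
    rw [List.getD_eq_getElem _ _ hmlt]
    simp [pvS]
  have hbody : (fun (s : List (List Int)) (j : Int) => pvSet2 s m j.toNat (pvGet2 s m (j-1).toNat + d j))
      = fun s j => s.set m ((fun (j : Int) (r : List Int) => r.set j.toNat (r.getD (j-1).toNat 0 + d j)) j (s.getD m [])) := by
    funext s j; rfl
  rw [hbody, pvFoldlRow _ _ m (by simpa [pvSet2] using hmlt) (fun (j : Int) (r : List Int) => r.set j.toNat (r.getD (j-1).toNat 0 + d j))]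
  have hg1 : (pvSet2 (pvS n m) m 0 v0).getD m [] = (List.replicate n (0:Int)).set 0 (f 0) := by
    unfold pvSet2
    rw [List.getD_eq_getElem _ _ (by simpa using hmlt), List.getElem_set_self (by simpa using hmlt)]
    rw [hgm, hv0]
  rw [hg1, pvRowFill n f d hrec n hn le_rfl]
  unfold pvSet2
  rw [List.set_set]
  apply List.ext_getElem (by simp [pvS])
  intro t ht1 ht2
  simp only [pvS, List.getElem_set, List.getElem_map, List.getElem_range]
  simp only [List.length_set, pvS, List.length_map, List.length_range] at ht1
  rcases lt_trichotomy t m with h | h | h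
  · rw [if_neg (by omega), if_pos h, if_pos (by omega)]
  · subst h
    rw [if_pos rfl, if_pos (by omega)]
    apply List.ext_getElem (by simp)
    intro u hu1 hu2
    simp only [List.getElem_map, List.getElem_range]
    simp only [List.length_map, List.length_range] at hu1
    rw [if_pos hu1, hrow u]
  · rw [if_neg (by omega), if_neg (by omega), if_neg (by omega)]

theorem pvOuter (n : Nat) (hn : 1 ≤ n) :
    ∀ m : Nat, m ≤ n + 1 →
    (PySem.List.pyRange 0 (m : Int) 1).foldl (fun s i =>
      if i = 0 then
        let s1 := pvSet2 s i.toNat 0 1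
        (PySem.List.pyRange 1 (n:Int) 1).foldl (fun s j =>
          pvSet2 s i.toNat j.toNat (pvGet2 s i.toNat (j-1).toNat + j)) s1
      else if 1 ≤ i ∧ i < (n:Int) then
        let s1 := pvSet2 s i.toNat 0 (pvGet2 s 0 i.toNat)
        (PySem.List.pyRange 1 (n:Int) 1).foldl (fun s j =>
          if j ≤ i then
            pvSet2 s i.toNat j.toNat (pvGet2 s i.toNat (j-1).toNat + 1)
          else
            pvSet2 s i.toNat j.toNat (pvGet2 s i.toNat (j-1).toNat + j)) s1
      else
        let s1 := pvSet2 s i.toNat 0 (pvGet2 s 0 0)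
        (PySem.List.pyRange 1 (n:Int) 1).foldl (fun s j =>
          pvSet2 s i.toNat j.toNat (pvGet2 s i.toNat (j-1).toNat + j + 1)) s1)
      (pvS n 0)
      = pvS n m := by
  intro m
  induction m with
  | zero =>
    intro _
    have he : PySem.List.pyRange 0 ((0:Nat):Int) 1 = [] := by
      rw [PySem.List.pyRange_one]; norm_num
    rw [he, List.foldl_nil]
  | succ m ih =>
    intro hm1
    have hmn : m ≤ n := by omega
    rw [show ((m+1:Nat):Int) = (m:Int)+1 by omega,
        PySem.List.pyRange_one_succ_right (by positivity), List.foldl_append,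
        ih (by omega), List.foldl_cons, List.foldl_nil]
    show (if (m:Int) = 0 then _ else if 1 ≤ (m:Int) ∧ (m:Int) < (n:Int) then _ else _) = pvS n (m+1)
    by_cases hm0 : m = 0
    · subst hm0
      rw [if_pos (by norm_num)]
      show (PySem.List.pyRange 1 (n:Int) 1).foldl
          (fun s j => pvSet2 s ((0:Nat):Int).toNat j.toNat (pvGet2 s ((0:Nat):Int).toNat (j-1).toNat + j))
          (pvSet2 (pvS n 0) ((0:Nat):Int).toNat 0 1) = pvS n 1
      simp only [Nat.cast_zero, Int.toNat_zero]
      exact pvStepRow n 0 hn (by omega) (fun (t:Nat) => pvCell (n:Int) 0 (t:Int)) (fun j => j) 1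
        (by beta_reduce; rw [pvCell_zero]; decide)
        (by
          intro j hj1 hjn
          beta_reduce
          have hc : ((j-1:Nat):Int) = (j:Int) - 1 := by omega
          rw [pvCell_zero, pvCell_zero, hc]
          rw [show ((j:Int)-1)*(((j:Int)-1)+1) = ((j:Int)-1)*(j:Int) by ring, pvQstep]
          ring)
        (fun t => rfl)
    · have hm1' : 1 ≤ m := by omega
      by_cases hmn2 : m < n
      · -- interior row
        rw [if_neg (by exact_mod_cast hm0), if_pos ⟨by exact_mod_cast hm1', by exact_mod_cast hmn2⟩]
        show (PySem.List.pyRange 1 (n:Int) 1).foldl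
            (fun s j => if j ≤ (m:Int) then
                pvSet2 s ((m:Nat):Int).toNat j.toNat (pvGet2 s ((m:Nat):Int).toNat (j-1).toNat + 1)
              else
                pvSet2 s ((m:Nat):Int).toNat j.toNat (pvGet2 s ((m:Nat):Int).toNat (j-1).toNat + j))
            (pvSet2 (pvS n m) ((m:Nat):Int).toNat 0 (pvGet2 (pvS n m) 0 ((m:Nat):Int).toNat)) = pvS n (m+1)
        simp only [Int.toNat_natCast]
        rw [pvGet2_pvS_zero n m m hm1' hmn2]
        have hb : (fun (s : List (List Int)) (j : Int) => if j ≤ (m:Int) then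
                pvSet2 s m j.toNat (pvGet2 s m (j-1).toNat + 1)
              else
                pvSet2 s m j.toNat (pvGet2 s m (j-1).toNat + j))
            = (fun (s : List (List Int)) (j : Int) =>
                pvSet2 s m j.toNat (pvGet2 s m (j-1).toNat + (if j ≤ (m:Int) then 1 else j))) := by
          funext s j; split_ifs <;> rfl
        rw [hb]
        have hmi0 : ¬((m:Int) = 0) := by exact_mod_cast hm0
        have hmin : (m:Int) < (n:Int) := by exact_mod_cast hmn2
        exact pvStepRow n m hn (by omega) (fun (t:Nat) => pvCell (n:Int) (m:Int) (t:Int))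
          (fun j => if j ≤ (m:Int) then 1 else j) (pvCell (n:Int) 0 (m:Int))
          (by
            beta_reduce
            rw [pvCell_zero, pvCell_mid _ _ _ hmi0 hmin, if_pos (by positivity)]
            ring)
          (by
            intro j hj1 hjn
            beta_reduce
            have hj1' : (1:Int) ≤ (j:Int) := by exact_mod_cast hj1
            have hc : ((j-1:Nat):Int) = (j:Int) - 1 := by omega
            rw [pvCell_mid _ _ _ hmi0 hmin, pvCell_mid _ _ _ hmi0 hmin, hc]
            by_cases hjm : (j:Int) ≤ (m:Int)
            · simp only [if_pos hjm, if_pos (show (j:Int) - 1 ≤ (m:Int) by omega)]; ring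
            · by_cases hjm1 : (j:Int) - 1 ≤ (m:Int)
              · -- j = m+1 : crossing the diagonal
                have hjm' : (j:Int) = (m:Int) + 1 := by omega
                simp only [if_neg hjm, if_pos hjm1]
                rw [show (j:Int)*((j:Int)+1) = (m:Int)*((m:Int)+1) + (j:Int)*2 by rw [hjm']; ring]
                rw [PySem.Int.floordiv_eq_ediv_of_pos (by omega),
                    PySem.Int.floordiv_eq_ediv_of_pos (by omega),
                    Int.add_mul_ediv_right _ _ (by omega : (2:Int) ≠ 0)]
                rw [hjm']; ring
              · simp only [if_neg hjm, if_neg hjm1]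
                rw [show ((j:Int)-1)*(((j:Int)-1)+1) = ((j:Int)-1)*(j:Int) by ring, pvQstep]
                ring)
          (fun t => rfl)
      · -- last row: m = n
        have hmn3 : m = n := by omega
        subst hmn3
        rw [if_neg (by exact_mod_cast hm0), if_neg (by omega)]
        show (PySem.List.pyRange 1 (m:Int) 1).foldl
            (fun s j => pvSet2 s ((m:Nat):Int).toNat j.toNat (pvGet2 s ((m:Nat):Int).toNat (j-1).toNat + j + 1))
            (pvSet2 (pvS m m) ((m:Nat):Int).toNat 0 (pvGet2 (pvS m m) 0 0)) = pvS m (m+1)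
        simp only [Int.toNat_natCast]
        have hg00 : pvGet2 (pvS m m) 0 0 = pvCell (m:Int) 0 (0:Int) := by
          have := pvGet2_pvS_zero m m 0 hm1' (by omega)
          simpa using this
        rw [hg00]
        have hb : (fun (s : List (List Int)) (j : Int) =>
                pvSet2 s m j.toNat (pvGet2 s m (j-1).toNat + j + 1))
            = (fun (s : List (List Int)) (j : Int) =>
                pvSet2 s m j.toNat (pvGet2 s m (j-1).toNat + (j + 1))) := by
          funext s j; rw [add_assoc]
        rw [hb]
        have hmi0 : ¬((m:Int) = 0) := by exact_mod_cast hm0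
        exact pvStepRow m m (by omega) le_rfl (fun (t:Nat) => pvCell (m:Int) (m:Int) (t:Int))
          (fun j => j + 1) (pvCell (m:Int) 0 (0:Int))
          (by
            beta_reduce
            rw [pvCell_zero, pvCell_last _ _ _ hmi0 (lt_irrefl _)]
            ring)
          (by
            intro j hj1 hjn
            beta_reduce
            have hc : ((j-1:Nat):Int) = (j:Int) - 1 := by omega
            rw [pvCell_last _ _ _ hmi0 (lt_irrefl _), pvCell_last _ _ _ hmi0 (lt_irrefl _), hc]
            rw [show ((j:Int)-1)*(((j:Int)-1)+1) = ((j:Int)-1)*(j:Int) by ring, pvQstep]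
            ring)
          (fun t => rfl)

-- ===== VERDICT (by name: the statement is the Claim_ definition above) =====
theorem pvS_zero_eq (n : Nat) :
    (PySem.List.pyRange 0 ((n+1:Nat):Int) 1).map (fun _ => List.replicate ((n:Int)).toNat (0:Int))
      = pvS n 0 := by
  apply List.ext_getElem (by simp [pvS, PySem.List.length_pyRange_one])
  intro t ht1 ht2
  simp [pvS]

theorem pvAlt_eq (n : Nat) :
    gen_set_alt (n:Int) = pvS n (n+1) := by
  unfold gen_set_alt
  have hb : (fun (out : List (List Int)) (i : Int) =>
      if i = 0 then
        out ++ [(PySem.List.pyRange 0 (n:Int) 1).map (fun j => 1 + PySem.Int.floordiv (j * (j + 1)) 2)]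
      else if i < (n:Int) then
        let t := 1 + PySem.Int.floordiv (i * (i + 1)) 2
        out ++ [(PySem.List.pyRange 0 (n:Int) 1).map (fun j =>
          if j ≤ i then t + j else 1 + i + PySem.Int.floordiv (j * (j + 1)) 2)]
      else
        out ++ [(PySem.List.pyRange 0 (n:Int) 1).map (fun j => 1 + j + PySem.Int.floordiv (j * (j + 1)) 2)])
      = fun out i => out ++ [(PySem.List.pyRange 0 (n:Int) 1).map (fun j => pvCell (n:Int) i j)] := by
    funext out i
    by_cases h0 : i = 0
    · subst h0
      rw [if_pos rfl]
      simp only [List.append_cancel_left_eq, List.cons.injEq, and_true, List.map_inj_left]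
      intro j _
      rw [pvCell_zero]
    · rw [if_neg h0]
      by_cases hk : i < (n:Int)
      · rw [if_pos hk]
        simp only [List.append_cancel_left_eq, List.cons.injEq, and_true, List.map_inj_left]
        intro j _
        rw [pvCell_mid _ _ _ h0 hk]
      · rw [if_neg hk]
        simp only [List.append_cancel_left_eq, List.cons.injEq, and_true, List.map_inj_left]
        intro j _
        rw [pvCell_last _ _ _ h0 hk]
  rw [hb, PySem.List.foldl_append_singleton_eq_map, List.nil_append]
  apply List.ext_getElem (by simp [pvS, PySem.List.length_pyRange_one])
  intro t ht1 ht2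
  simp only [List.length_map, PySem.List.length_pyRange_one] at ht1
  simp only [List.getElem_map, PySem.List.getElem_pyRange_one, pvS, List.getElem_range]
  rw [if_pos (by omega)]
  apply List.ext_getElem (by simp [PySem.List.length_pyRange_one])
  intro u hu1 hu2
  simp only [List.length_map, PySem.List.length_pyRange_one] at hu1
  simp only [List.getElem_map, PySem.List.getElem_pyRange_one, List.getElem_range]
  norm_num

theorem gen_set_spec : Claim_equal_gen_set := by
  intro k _ hk
  unfold Spec_gen_set
  by_cases hneg : k < 0
  · have he : PySem.List.pyRange 0 (k+1) 1 = [] := by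
      rw [PySem.List.pyRange_one, show (k+1-0).toNat = 0 by omega]
      rfl
    unfold gen_set gen_set_alt
    rw [he]
    rfl
  · have hk1 : 0 < k := by
      unfold Pre_gen_set at hk
      omega
    obtain ⟨n, rfl⟩ : ∃ n : Nat, k = (n:Int) := ⟨k.toNat, by omega⟩
    have hn : 1 ≤ n := by exact_mod_cast hk1
    rw [pvAlt_eq n]
    unfold gen_set
    rw [show ((n:Int)+1) = ((n+1:Nat):Int) by omega]
    show (PySem.List.pyRange 0 ((n+1:Nat):Int) 1).foldl _
        ((PySem.List.pyRange 0 ((n+1:Nat):Int) 1).map (fun _ => List.replicate ((n:Int)).toNat (0:Int))) = _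
    rw [pvS_zero_eq n, pvOuter n hn (n+1) le_rfl]

@[simp] theorem gen_set_raises : Claim_raises_gen_set := by
  unfold Claim_raises_gen_set
  exact ⟨by intro k _ h hp; exact hp h, by decide⟩
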